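-- pv_equiv track=rewrite | github.com/wbond/certbuilder | dev/api_docs.py | _get_func_info
-- ===== SOURCE A (Python) =====
-- def _get_func_info(docstring, def_lineno, code_lines, prefix):
--     definition = code_lines[def_lineno - 1]
--     definition = definition.strip().rstrip(':')
--
--     description = ''
--     found_colon = False
--
--     params = ''
--
--     for line in docstring.splitlines():
--         if line and line[0] == ':':
--             found_colon = True
--         if not found_colon:
--             if description:
--                 description += '\n'
--             description += line
--         else:
--             if params:
--                 params += '\n'
--             params += line
--
--     description = description.strip()
--     description_md = ''
--     if description:
--         description_md = "%s%s" % (prefix, description.replace("\n", "\n" + prefix))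
--
--     params = params.strip()
--     if params:
--         definition += (':\n%s    """\n%s    ' % (prefix, prefix)) + params.replace('\n', '\n%s    ' % prefix) + ('\n%s    """' % prefix)
--
--     return (definition, description_md)
-- ===== SOURCE B (Python) =====
-- def _get_func_info(docstring, def_lineno, code_lines, prefix):
--     definition = code_lines[def_lineno - 1].strip().rstrip(':')
--
--     # locate the boundary: first line starting with ':' opens the params block
--     lines = docstring.splitlines()
--     i = next((k for k, l in enumerate(lines) if l.startswith(':')), len(lines))
--
--     description = '\n'.join(lines[:i]).strip()
--     description_md = prefix + description.replace('\n', '\n' + prefix) if description else ''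
--
--     params = '\n'.join(lines[i:]).strip()
--     if params:
--         ind = '\n' + prefix + '    '
--         definition += ':' + ind + '"""' + ind + params.replace('\n', ind) + ind + '"""'
--
--     return (definition, description_md)
-- ===== Notes on version B (the rewrite author's own statement) =====
-- stated objective: simpler
-- what changed: Replaces the flag-latched single-pass accumulation of description/params with a locate-the-first-':'-line boundary, then slice-and-join; same strip/prefix formatting afterwards.
import Mathlib
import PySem

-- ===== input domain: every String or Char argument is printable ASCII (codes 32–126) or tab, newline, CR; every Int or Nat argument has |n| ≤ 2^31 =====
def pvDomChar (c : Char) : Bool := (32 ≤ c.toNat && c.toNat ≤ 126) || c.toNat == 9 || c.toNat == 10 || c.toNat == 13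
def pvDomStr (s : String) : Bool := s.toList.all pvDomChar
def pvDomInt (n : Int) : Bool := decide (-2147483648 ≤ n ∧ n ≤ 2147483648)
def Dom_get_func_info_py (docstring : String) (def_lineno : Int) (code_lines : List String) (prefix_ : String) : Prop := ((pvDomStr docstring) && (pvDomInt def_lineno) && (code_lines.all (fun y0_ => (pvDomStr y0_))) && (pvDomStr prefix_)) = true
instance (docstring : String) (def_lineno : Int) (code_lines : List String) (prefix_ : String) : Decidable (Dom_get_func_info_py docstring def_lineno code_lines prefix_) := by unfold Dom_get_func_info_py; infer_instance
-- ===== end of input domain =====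

-- B replaces A's flag-latched single accumulation pass with find-the-first-':'-line,
-- slice-and-join; objective: simpler decomposition, same formatting afterwards.


-- hand port of Python's str.rstrip(':') (PySem has only the two-sided stripChars); exact:
-- drops the maximal run of trailing ':' code points
def pyRstripColon (s : String) : String :=
  String.ofList ((s.toList.reverse.dropWhile (· == ':')).reverse)

-- ===== PORT A =====
-- the loop body of A: state (description, found_colon, params)
def pvStepA (st : String × Bool × String) (line : String) : String × Bool × String :=
  let found := if line ≠ "" && (PySem.Str.pyGet? line 0 == some ':') then true else st.2.1
  if !found then
    ((if st.1 ≠ "" then st.1 ++ "\n" else st.1) ++ line, found, st.2.2)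
  else
    (st.1, found, (if st.2.2 ≠ "" then st.2.2 ++ "\n" else st.2.2) ++ line)

def get_func_info_py (docstring : String) (def_lineno : Int) (code_lines : List String) (prefix_ : String) : String × String :=
  let definition := pyRstripColon (PySem.Str.strip (PySem.List.pyGetD code_lines (def_lineno - 1) ""))
  let st := (PySem.Str.splitlines docstring).foldl pvStepA ("", false, "")
  let description := PySem.Str.strip st.1
  let description_md :=
    if description ≠ "" then prefix_ ++ PySem.Str.replace description "\n" ("\n" ++ prefix_) else ""
  let params := PySem.Str.strip st.2.2
  let definition :=
    if params ≠ "" then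
      definition ++ (":\n" ++ prefix_ ++ "    \"\"\"\n" ++ prefix_ ++ "    ")
        ++ PySem.Str.replace params "\n" ("\n" ++ prefix_ ++ "    ")
        ++ ("\n" ++ prefix_ ++ "    \"\"\"")
    else definition
  (definition, description_md)

-- ===== PORT B =====
def get_func_info_py_alt (docstring : String) (def_lineno : Int) (code_lines : List String) (prefix_ : String) : String × String :=
  let definition := pyRstripColon (PySem.Str.strip (PySem.List.pyGetD code_lines (def_lineno - 1) ""))
  let lines := PySem.Str.splitlines docstring
  let i := lines.findIdx (fun l => PySem.Str.startswith l ":")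
  let description := PySem.Str.strip (PySem.Str.join "\n" (lines.take i))
  let description_md :=
    if description ≠ "" then prefix_ ++ PySem.Str.replace description "\n" ("\n" ++ prefix_) else ""
  let params := PySem.Str.strip (PySem.Str.join "\n" (lines.drop i))
  let ind := "\n" ++ prefix_ ++ "    "
  let definition :=
    if params ≠ "" then
      definition ++ ":" ++ ind ++ "\"\"\"" ++ ind ++ PySem.Str.replace params "\n" ind ++ ind ++ "\"\"\""
    else definition
  (definition, description_md)

-- ===== PRECONDITION & SPEC =====
-- Pre_ excludes exactly the inputs where Python A raises IndexError on code_lines[def_lineno - 1]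
def Pre_get_func_info_py (docstring : String) (def_lineno : Int) (code_lines : List String) (prefix_ : String) : Prop :=
  PySem.Raise.InRange code_lines.length (def_lineno - 1)
instance (docstring : String) (def_lineno : Int) (code_lines : List String) (prefix_ : String) : Decidable (Pre_get_func_info_py docstring def_lineno code_lines prefix_) := by unfold Pre_get_func_info_py; infer_instance

def pvWitness_get_func_info_py : String × Int × List String × String :=
  ("Docs.\n:param x: thing", 1, ["def f(x):"], "    ")

def Spec_get_func_info_py (docstring : String) (def_lineno : Int) (code_lines : List String) (prefix_ : String) (out : String × String) : Prop := out = get_func_info_py_alt docstring def_lineno code_lines prefix_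
instance (docstring : String) (def_lineno : Int) (code_lines : List String) (prefix_ : String) (out : String × String) : Decidable (Spec_get_func_info_py docstring def_lineno code_lines prefix_ out) := by unfold Spec_get_func_info_py; infer_instance

-- ===== CLAIM (what is proved, stated in full; the proofs are below) =====
def Claim_equal_get_func_info_py : Prop := ∀ (docstring : String) (def_lineno : Int) (code_lines : List String) (prefix_ : String), Dom_get_func_info_py docstring def_lineno code_lines prefix_ → Pre_get_func_info_py docstring def_lineno code_lines prefix_ → Spec_get_func_info_py docstring def_lineno code_lines prefix_ (get_func_info_py docstring def_lineno code_lines prefix_)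

-- ===== LEMMAS AND PROOFS =====

-- the description/params accumulation step shared by both branches of A's loop
def pvAcc (d l : String) : String := (if d ≠ "" then d ++ "\n" else d) ++ l

-- A's latch condition on a line, as A tests it
def pvColon (l : String) : Bool := l ≠ "" && (PySem.Str.pyGet? l 0 == some ':')

lemma pvColon_eq_startswith (l : String) : pvColon l = PySem.Str.startswith l ":" := by
  unfold pvColon
  rw [PySem.Str.startswith_eq]
  rcases hl : l.toList with _ | ⟨c, cs⟩
  · have h0 : l = "" := String.toList_eq_nil_iff.mp hl
    subst h0
    simp [PySem.Chars.startswith]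
  · have hne : l ≠ "" := by
      intro h; subst h; simp at hl
    by_cases hc : c = ':'
    · simp [hne, PySem.Str.pyGet?, PySem.Chars.pyGet?, PySem.List.pyGet?_zero, hl, hc,
        PySem.Chars.startswith, List.isPrefixOf, show (":" : String).toList = [':'] from rfl]
    · simp [hne, PySem.Str.pyGet?, PySem.Chars.pyGet?, PySem.List.pyGet?_zero, hl, hc,
        PySem.Chars.startswith, List.isPrefixOf, show (":" : String).toList = [':'] from rfl,
        Ne.symm hc]

lemma loopA_true (lines : List String) : ∀ d p,
    lines.foldl pvStepA (d, true, p) = (d, true, lines.foldl pvAcc p) := by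
  induction lines with
  | nil => intro d p; rfl
  | cons l ls ih =>
    intro d p
    have hstep : pvStepA (d, true, p) l = (d, true, pvAcc p l) := by
      simp [pvStepA, pvAcc]
    simp only [List.foldl_cons, hstep, ih]

lemma loopA_false (lines : List String) : ∀ d,
    ((lines.foldl pvStepA (d, false, "")).1
       = (lines.takeWhile (fun l => !pvColon l)).foldl pvAcc d)
  ∧ ((lines.foldl pvStepA (d, false, "")).2.2
       = (lines.dropWhile (fun l => !pvColon l)).foldl pvAcc "") := by
  induction lines with
  | nil => intro d; exact ⟨rfl, rfl⟩
  | cons l ls ih =>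
    intro d
    by_cases hc : pvColon l
    · have hcb : (decide (l ≠ "") && (PySem.Str.pyGet? l 0 == some ':')) = true := by
        simpa [pvColon] using hc
      have hstep : pvStepA (d, false, "") l = (d, true, pvAcc "" l) := by
        simp only [pvStepA]
        rw [hcb]
        simp [pvAcc]
      simp only [List.foldl_cons, hstep, loopA_true, List.takeWhile_cons, List.dropWhile_cons,
        hc, Bool.not_true, List.foldl_cons]
      exact ⟨rfl, rfl⟩
    · have hcb : (decide (l ≠ "") && (PySem.Str.pyGet? l 0 == some ':')) = false := by
        simpa [pvColon] using hc
      have hstep : pvStepA (d, false, "") l = (pvAcc d l, false, "") := by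
        simp only [pvStepA]
        rw [hcb]
        simp [pvAcc]
      simp only [List.foldl_cons, hstep, List.takeWhile_cons, List.dropWhile_cons, hc,
        Bool.not_false, List.foldl_cons]
      exact ih (pvAcc d l)

lemma acc_join (xs : List String) : ∀ d, d ≠ "" →
    xs.foldl pvAcc d = PySem.Str.join "\n" (d :: xs) := by
  induction xs with
  | nil =>
    intro d _
    rw [← String.toList_inj]
    simp [PySem.Str.toList_join, PySem.Chars.join_singleton]
  | cons x xs ih =>
    intro d hd
    have hacc : pvAcc d x = d ++ "\n" ++ x := by simp [pvAcc, hd]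
    have hne : d ++ "\n" ++ x ≠ "" := by
      intro h
      have := congrArg String.toList h
      simp [String.toList_append] at this
    rw [List.foldl_cons, hacc, ih _ hne, ← String.toList_inj]
    simp only [PySem.Str.toList_join, List.map_cons, PySem.Chars.join_cons_cons,
      String.toList_append]
    cases xs with
    | nil =>
      simp [PySem.Chars.join_singleton]
    | cons y ys =>
      simp [PySem.Chars.join_cons_cons]

lemma acc_empty (xs : List String) :
    xs.foldl pvAcc "" = PySem.Str.join "\n" (xs.dropWhile (· == "")) := by
  induction xs with
  | nil =>
    rw [← String.toList_inj]
    simp only [PySem.Str.toList_join, List.dropWhile_nil, List.map_nil]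
    rfl
  | cons x xs ih =>
    by_cases hx : x = ""
    · subst hx
      have h0 : pvAcc "" "" = "" := by
        rw [← String.toList_inj]; simp [pvAcc]
      simp only [List.foldl_cons, h0, List.dropWhile_cons]
      simpa using ih
    · have h0 : pvAcc "" x = x := by
        rw [← String.toList_inj]; simp [pvAcc]
      simp only [List.foldl_cons, h0, List.dropWhile_cons]
      rw [acc_join xs x hx]
      simp [hx]

lemma strip_cons_newline (cs : List Char) :
    PySem.Chars.strip ('\n' :: cs) = PySem.Chars.strip cs := by
  unfold PySem.Chars.strip PySem.Chars.lstrip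
  rw [List.dropWhile_cons_of_pos (by rfl)]

lemma strip_join_dropWhile (xs : List String) :
    PySem.Str.strip (PySem.Str.join "\n" (xs.dropWhile (· == ""))) = PySem.Str.strip (PySem.Str.join "\n" xs) := by
  induction xs with
  | nil => rfl
  | cons x xs ih =>
    by_cases hx : x = ""
    · subst hx
      rw [List.dropWhile_cons_of_pos (by simp), ih, ← String.toList_inj]
      simp only [PySem.Str.toList_strip, PySem.Str.toList_join, List.map_cons]
      cases xs with
      | nil => rfl
      | cons y ys =>
        rw [List.map_cons, PySem.Chars.join_cons_cons,
          show (("" : String).toList : List Char) = [] from rfl,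
          show (("\n" : String).toList : List Char) = ['\n'] from rfl,
          List.nil_append, List.singleton_append, strip_cons_newline,
          show (['\n'] : List Char) = ("\n" : String).toList from rfl]
    · rw [List.dropWhile_cons_of_neg (by simp [hx])]

lemma strip_acc (xs : List String) :
    PySem.Str.strip (xs.foldl pvAcc "") = PySem.Str.strip (PySem.Str.join "\n" xs) := by
  rw [acc_empty, strip_join_dropWhile]

lemma take_findIdx_eq_takeWhile (p : String → Bool) (xs : List String) :
    xs.take (xs.findIdx p) = xs.takeWhile (fun x => !p x) := by
  induction xs with
  | nil => rfl
  | cons x xs ih =>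
    by_cases h : p x
    · simp [List.findIdx_cons, h]
    · simp [List.findIdx_cons, h, ih]

lemma drop_findIdx_eq_dropWhile (p : String → Bool) (xs : List String) :
    xs.drop (xs.findIdx p) = xs.dropWhile (fun x => !p x) := by
  induction xs with
  | nil => rfl
  | cons x xs ih =>
    by_cases h : p x
    · simp [List.findIdx_cons, h]
    · simp [List.findIdx_cons, h, ih]

-- the two ways the two ports assemble the params block produce the same string
lemma params_block_eq (defn q R : String) :
    defn ++ (":\n" ++ q ++ "    \"\"\"\n" ++ q ++ "    ") ++ R ++ ("\n" ++ q ++ "    \"\"\"")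
      = defn ++ ":" ++ ("\n" ++ q ++ "    ") ++ "\"\"\"" ++ ("\n" ++ q ++ "    ") ++ R
          ++ ("\n" ++ q ++ "    ") ++ "\"\"\"" := by
  rw [← String.toList_inj]
  simp only [String.toList_append,
    show (":\n" : String).toList = [':', '\n'] from rfl,
    show ("    \"\"\"\n" : String).toList = [' ', ' ', ' ', ' ', '\"', '\"', '\"', '\n'] from rfl,
    show ("    " : String).toList = [' ', ' ', ' ', ' '] from rfl,
    show ("\n" : String).toList = ['\n'] from rfl,
    show (":" : String).toList = [':'] from rfl,
    show ("\"\"\"" : String).toList = ['\"', '\"', '\"'] from rfl,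
    show ("    \"\"\"" : String).toList = [' ', ' ', ' ', ' ', '\"', '\"', '\"'] from rfl]
  simp

-- ===== VERDICT (by name: the statement is the Claim_ definition above) =====

theorem get_func_info_py_spec : Claim_equal_get_func_info_py := by
  intro docstring def_lineno code_lines prefix_ _ _
  unfold Spec_get_func_info_py get_func_info_py get_func_info_py_alt
  simp only []
  have hfun : (fun l => !pvColon l) = (fun l => !PySem.Str.startswith l ":") := by
    funext l; rw [pvColon_eq_startswith]
  have hst := loopA_false (PySem.Str.splitlines docstring) ""
  have h1 : PySem.Str.strip (((PySem.Str.splitlines docstring).foldl pvStepA ("", false, "")).1)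
      = PySem.Str.strip (PySem.Str.join "\n"
          ((PySem.Str.splitlines docstring).take
            ((PySem.Str.splitlines docstring).findIdx (fun l => PySem.Str.startswith l ":")))) := by
    rw [hst.1, take_findIdx_eq_takeWhile, ← hfun]
    generalize (PySem.Str.splitlines docstring).takeWhile (fun l => !pvColon l) = ys
    exact strip_acc ys
  have h2 : PySem.Str.strip (((PySem.Str.splitlines docstring).foldl pvStepA ("", false, "")).2.2)
      = PySem.Str.strip (PySem.Str.join "\n"
          ((PySem.Str.splitlines docstring).drop
            ((PySem.Str.splitlines docstring).findIdx (fun l => PySem.Str.startswith l ":")))) := by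
    rw [hst.2, drop_findIdx_eq_dropWhile, ← hfun]
    generalize (PySem.Str.splitlines docstring).dropWhile (fun l => !pvColon l) = ys
    exact strip_acc ys
  rw [h1, h2]
  refine Prod.ext ?_ rfl
  simp only []
  split
  · exact params_block_eq _ _ _
  · rfl
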